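-- pv_equiv track=rewrite | github.com/nmusaelian-rally/bamboo_connector | bldeif/bamboo_connection.py | makeFieldsString
-- ===== SOURCE A (Python) =====
-- def makeFieldsString(depth):
--     basic_fields = '_class,name,displayName,views[name,jobs[name]],jobs'
--     detailed_fetch = basic_fields[:]
--     if depth <= 1:
--         return basic_fields
--
--     for i in range(1, depth):
--         detailed_fetch = "%s[%s]" % (basic_fields, detailed_fetch)
--     return detailed_fetch
-- ===== SOURCE B (Python) =====
-- def makeFieldsString(depth):
--     basic_fields = '_class,name,displayName,views[name,jobs[name]],jobs'
--     n = max(depth - 1, 0)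
--     return (basic_fields + '[') * n + basic_fields + ']' * n
-- ===== Notes on version B (the rewrite author's own statement) =====
-- stated objective: simpler
-- what changed: Replaced the iterative inside-out wrapping loop (and its depth<=1 early return) with a guard-free closed form: replicate the fixed prefix '(basic_fields[)' and suffix ']' n = max(depth-1,0) times by string multiplication around one core copy.
import Mathlib
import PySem

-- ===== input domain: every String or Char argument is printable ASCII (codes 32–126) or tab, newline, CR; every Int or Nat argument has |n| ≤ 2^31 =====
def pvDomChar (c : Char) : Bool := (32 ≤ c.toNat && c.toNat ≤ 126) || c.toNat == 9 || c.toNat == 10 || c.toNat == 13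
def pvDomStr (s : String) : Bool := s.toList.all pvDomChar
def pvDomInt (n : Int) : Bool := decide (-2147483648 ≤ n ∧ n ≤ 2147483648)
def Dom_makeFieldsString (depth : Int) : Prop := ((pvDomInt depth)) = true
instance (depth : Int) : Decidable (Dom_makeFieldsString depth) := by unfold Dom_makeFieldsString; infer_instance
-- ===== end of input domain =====

-- B replaces A's iterative inside-out wrapping loop (and its early-return guard) with a
-- guard-free closed form: replicated prefix/suffix around one core copy (simpler).

-- ===== PORT A =====
def makeFieldsString (depth : Int) : String :=
  let basic_fields := "_class,name,displayName,views[name,jobs[name]],jobs"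
  let detailed_fetch := basic_fields
  if depth ≤ 1 then basic_fields
  else
    (PySem.List.pyRange 1 depth 1).foldl
      (fun acc _ => basic_fields ++ "[" ++ acc ++ "]") detailed_fetch

-- ===== PORT B =====
def makeFieldsString_alt (depth : Int) : String :=
  let basic_fields := "_class,name,displayName,views[name,jobs[name]],jobs"
  let n := (max (depth - 1) 0).toNat
  String.join (List.replicate n (basic_fields ++ "[")) ++ basic_fields
    ++ String.join (List.replicate n "]")

-- ===== PRECONDITION & SPEC =====
def Spec_makeFieldsString (depth : Int) (out : String) : Prop := out = makeFieldsString_alt depth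
instance (depth : Int) (out : String) : Decidable (Spec_makeFieldsString depth out) := by unfold Spec_makeFieldsString; infer_instance

-- ===== CLAIM (what is proved, stated in full; the proofs are below) =====
def Claim_equal_makeFieldsString : Prop := ∀ (depth : Int), Dom_makeFieldsString depth → Spec_makeFieldsString depth (makeFieldsString depth)

-- ===== LEMMAS AND PROOFS =====

theorem toList_foldl_append (l : List String) (s : String) :
    (List.foldl (fun r t => r ++ t) s l).toList = s.toList ++ (l.map String.toList).flatten := by
  induction l generalizing s with
  | nil => simp
  | cons a t ih => simp [ih]

theorem flatten_replicate_comm {α : Type} (xs : List α) (n : Nat) :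
    (List.replicate n xs).flatten ++ xs = xs ++ (List.replicate n xs).flatten := by
  induction n with
  | zero => simp
  | succ k ih => simp [List.replicate_succ, List.append_assoc, ih]

theorem comm3 {α : Type} (x y r : List α) (k : Nat) :
    (List.replicate k (x ++ y)).flatten ++ (x ++ (y ++ r))
      = x ++ (y ++ ((List.replicate k (x ++ y)).flatten ++ r)) := by
  have h : x ++ (y ++ ((List.replicate k (x ++ y)).flatten ++ r))
      = ((x ++ y) ++ (List.replicate k (x ++ y)).flatten) ++ r := by
    simp [List.append_assoc]
  rw [h, ← flatten_replicate_comm]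
  simp [List.append_assoc]

-- A's loop over any list of length k wraps s into (F ++ "[")^k ++ s ++ "]"^k.
theorem wrap_foldl (F : String) (l : List Int) (s : String) :
    l.foldl (fun acc _ => F ++ "[" ++ acc ++ "]") s
      = String.join (List.replicate l.length (F ++ "[")) ++ s
        ++ String.join (List.replicate l.length "]") := by
  induction l generalizing s with
  | nil => apply String.ext; simp [String.join]
  | cons a t ih =>
      simp only [List.foldl_cons, List.length_cons]
      rw [ih]
      apply String.ext
      simp only [String.join, toList_foldl_append, List.map_replicate, List.map_cons,
        String.toList_append, List.replicate_succ, List.flatten_cons, List.append_assoc,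
        String.toList_empty, List.nil_append]
      exact comm3 F.toList "[".toList _ t.length

-- ===== VERDICT (by name: the statement is the Claim_ definition above) =====
theorem makeFieldsString_spec : Claim_equal_makeFieldsString := by
  intro depth _
  unfold Spec_makeFieldsString makeFieldsString makeFieldsString_alt
  by_cases h : depth ≤ 1
  · have hz : (max (depth - 1) 0).toNat = 0 := by omega
    rw [if_pos h, hz]
    apply String.ext; simp [String.join]
  · have hlen : (PySem.List.pyRange 1 depth 1).length = (depth - 1).toNat :=
      PySem.List.length_pyRange_one 1 depth
    have hmax : (max (depth - 1) 0).toNat = (depth - 1).toNat := by omega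
    simp only [if_neg h, hmax]
    rw [wrap_foldl, hlen]
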